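-- pv_equiv track=rewrite | github.com/beatomas/UNI | 1º/Programació avançada/Projecte Final/main.py | document
-- ===== SOURCE A (Python) =====
-- def document(posicio,comandes):
--     llista=[]
--     llista2=[]
--
--     r = comandes[posicio]
--
--     for x in r:
--         llista.append(x)
--
--     llista.reverse()
--
--     y= True
--     for x in llista:
--         if x!="/" and y==True:
--
--             llista2.append(x)
--
--         if x=="/":
--             y=False
--
--     llista2.reverse()
--
--     nom= "".join(llista2)
--
--     return nom
-- ===== SOURCE B (Python) =====
-- def document(posicio, comandes):
--     nom = ""
--     for x in comandes[posicio]: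
--         if x == "/":
--             nom = ""
--         else:
--             nom = nom + x
--     return nom
-- ===== Notes on version B (the rewrite author's own statement) =====
-- stated objective: simpler
-- what changed: Single forward pass that resets the accumulator on each '/', instead of A's copy-reverse-collect-until-slash-reverse-join pipeline.
import Mathlib
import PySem

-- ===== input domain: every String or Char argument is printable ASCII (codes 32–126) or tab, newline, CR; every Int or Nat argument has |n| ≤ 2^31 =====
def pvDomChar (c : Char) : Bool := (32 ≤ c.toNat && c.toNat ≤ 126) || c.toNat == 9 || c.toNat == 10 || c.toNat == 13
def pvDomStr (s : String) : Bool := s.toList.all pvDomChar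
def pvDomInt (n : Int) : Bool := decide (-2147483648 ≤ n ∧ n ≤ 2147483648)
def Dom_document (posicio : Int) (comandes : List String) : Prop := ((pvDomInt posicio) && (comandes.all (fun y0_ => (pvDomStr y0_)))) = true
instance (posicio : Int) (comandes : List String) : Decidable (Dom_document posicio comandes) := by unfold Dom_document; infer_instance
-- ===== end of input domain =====

-- B replaces A's copy / reverse / collect-until-slash / reverse / join pipeline by one forward
-- pass that resets the accumulator at each '/'; objective: simpler. Return-value equivalence only.

-- ===== PORT A =====
-- second loop of A: iterate over the reversed char list with flag y, collecting x when x ≠ '/' and y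
def documentLoop2 (l : List Char) (llista2 : List Char) (y : Bool) : List Char :=
  match l with
  | [] => llista2
  | x :: xs =>
      let llista2 := if x ≠ '/' ∧ y = true then llista2 ++ [x] else llista2
      let y := if x = '/' then false else y
      documentLoop2 xs llista2 y

def document (posicio : Int) (comandes : List String) : String :=
  match PySem.List.pyGet? comandes posicio with
  | none => ""  -- IndexError; excluded by Pre_document
  | some r =>
      let llista := (r.toList.foldl (fun acc x => acc ++ [x]) []).reverse
      let llista2 := (documentLoop2 llista [] true).reverse
      String.mk llista2

-- ===== PORT B =====
def document_alt (posicio : Int) (comandes : List String) : String :=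
  match PySem.List.pyGet? comandes posicio with
  | none => ""  -- IndexError; excluded by Pre_document
  | some r =>
      String.mk (r.toList.foldl (fun nom x => if x = '/' then [] else nom ++ [x]) [])

-- ===== PRECONDITION & SPEC =====
-- Pre_: comandes[posicio] raises IndexError when posicio is out of range (Python negative indexing allowed).
def Pre_document (posicio : Int) (comandes : List String) : Prop :=
  PySem.Raise.InRange comandes.length posicio
instance (posicio : Int) (comandes : List String) : Decidable (Pre_document posicio comandes) := by
  unfold Pre_document; infer_instance

def pvWitness_document : Int × List String := (0, ["dir/sub/file.txt"])

def Spec_document (posicio : Int) (comandes : List String) (out : String) : Prop := out = document_alt posicio comandes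
instance (posicio : Int) (comandes : List String) (out : String) : Decidable (Spec_document posicio comandes out) := by unfold Spec_document; infer_instance

-- ===== CLAIM (what is proved, stated in full; the proofs are below) =====
def Claim_equal_document : Prop := ∀ (posicio : Int) (comandes : List String), Dom_document posicio comandes → Pre_document posicio comandes → Spec_document posicio comandes (document posicio comandes)

-- ===== LEMMAS AND PROOFS =====

theorem documentLoop2_false (l : List Char) (acc : List Char) :
    documentLoop2 l acc false = acc := by
  induction l generalizing acc with
  | nil => rfl
  | cons x xs ih => simp [documentLoop2, ih]

-- A's flagged loop collects exactly the prefix of its input before the first '/'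
theorem documentLoop2_eq_takeWhile (l : List Char) (acc : List Char) :
    documentLoop2 l acc true = acc ++ l.takeWhile (fun x => x ≠ '/') := by
  induction l generalizing acc with
  | nil => simp [documentLoop2]
  | cons x xs ih =>
    by_cases hx : x = '/'
    · simp [documentLoop2, hx, documentLoop2_false]
    · simp [documentLoop2, hx, ih]

-- B's fold computes the (reversed-takeWhile-reversed) suffix after the last '/', or the whole list
theorem foldB_eq (cs : List Char) (acc : List Char) :
    cs.foldl (fun nom x => if x = '/' then [] else nom ++ [x]) acc
      = if '/' ∈ cs then ((cs.reverse.takeWhile (fun x => x ≠ '/')).reverse) else acc ++ cs := by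
  induction cs using List.reverseRecOn generalizing acc with
  | nil => simp
  | append_singleton cs c ih =>
    by_cases hc : c = '/'
    · simp [hc, List.foldl_append, ih]
    · simp [hc, List.foldl_append, ih]
      by_cases hm : '/' ∈ cs <;> simp [hm]
      exact fun h => absurd h.symm hc

theorem foldl_append_id (cs acc : List Char) :
    cs.foldl (fun acc x => acc ++ [x]) acc = acc ++ cs := by
  induction cs generalizing acc with
  | nil => simp
  | cons x xs ih => simp [List.foldl_cons, ih]

-- ===== VERDICT (by name: the statement is the Claim_ definition above) =====
theorem document_spec : Claim_equal_document := by
  intro posicio comandes _ hpre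
  unfold Spec_document document document_alt
  cases hg : PySem.List.pyGet? comandes posicio with
  | none => rfl
  | some r =>
    simp only [foldl_append_id, documentLoop2_eq_takeWhile, foldB_eq]
    by_cases hm : '/' ∈ r.toList
    · simp [hm]
    · have h2 : r.toList.reverse.takeWhile (fun x => !decide (x = '/')) = r.toList.reverse := by
        apply List.takeWhile_eq_self_iff.mpr
        intro x hx
        simp only [List.mem_reverse] at hx
        simp; exact fun h => hm (h ▸ hx)
      simp [hm, h2]
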